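-- pv_equiv track=rewrite | github.com/eliottcassidy2000/math | 04-computation/seven_eight_transition.py | count_alpha_by_type
-- ===== SOURCE A (Python) =====
-- from collections import defaultdict
--
-- def count_alpha_by_type(cycles, n):
--     """Count α₂ decomposed by cycle length types."""
--     alpha2_by_type = defaultdict(int)
--     for i in range(len(cycles)):
--         for j in range(i+1, len(cycles)):
--             if not (cycles[i][1] & cycles[j][1]):
--                 type_key = tuple(sorted([cycles[i][2], cycles[j][2]]))
--                 alpha2_by_type[type_key] += 1
--     return dict(alpha2_by_type)
-- ===== SOURCE B (Python) =====
-- from collections import Counter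
--
--
-- def count_alpha_by_type(cycles, n):
--     """Count α₂ decomposed by cycle length types."""
--     def pair_keys(cs):
--         if not cs:
--             return []
--         (_, m1, t1), rest = cs[0], cs[1:]
--         here = [(t1, t2) if t1 <= t2 else (t2, t1)
--                 for (_, m2, t2) in rest if (m1 & m2) == 0]
--         return here + pair_keys(rest)
--     return dict(Counter(pair_keys(cycles)))
-- ===== Notes on version B (the rewrite author's own statement) =====
-- stated objective: alternative
-- what changed: Replaces A's index double loop that increments a defaultdict in place by a structural recursion on the list that materialises the list of sorted type-key pairs for disjoint masks and counts it in one pass with collections.Counter.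
import Mathlib
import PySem

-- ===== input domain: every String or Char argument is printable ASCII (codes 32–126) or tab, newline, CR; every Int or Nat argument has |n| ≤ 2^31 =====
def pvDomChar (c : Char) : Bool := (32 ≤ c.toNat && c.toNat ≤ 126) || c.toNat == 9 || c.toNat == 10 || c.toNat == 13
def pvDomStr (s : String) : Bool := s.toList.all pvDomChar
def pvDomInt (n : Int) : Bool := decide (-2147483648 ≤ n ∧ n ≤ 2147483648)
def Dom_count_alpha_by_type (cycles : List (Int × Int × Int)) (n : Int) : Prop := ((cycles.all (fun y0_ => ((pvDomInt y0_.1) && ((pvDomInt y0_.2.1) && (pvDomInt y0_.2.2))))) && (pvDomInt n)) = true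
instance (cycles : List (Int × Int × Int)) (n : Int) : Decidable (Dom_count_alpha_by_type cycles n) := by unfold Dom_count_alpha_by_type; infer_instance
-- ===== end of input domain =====

-- B replaces A's incremental defaultdict over an index double loop by a structural
-- recursion that materialises the list of disjoint-pair type keys and counts it once
-- with Counter (objective: alternative decomposition, same cost).

-- ===== PORT A =====
-- tuple(sorted([a, b])) for two ints is exactly this (stable on ties):
def pvSortedPair (a b : Int) : Int × Int := if a ≤ b then (a, b) else (b, a)

def count_alpha_by_type (cycles : List (Int × Int × Int)) (n : Int) : List (Int × Int × Int) :=
  let d : PySem.Dict (Int × Int) Int :=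
    (PySem.List.pyRange 0 (PySem.List.len cycles) 1).foldl (fun d i =>
      (PySem.List.pyRange (i + 1) (PySem.List.len cycles) 1).foldl (fun d j =>
        let ci := PySem.List.pyGetD cycles i (0, 0, 0)
        let cj := PySem.List.pyGetD cycles j (0, 0, 0)
        if PySem.Int.band ci.2.1 cj.2.1 = 0 then
          d.modify (pvSortedPair ci.2.2 cj.2.2) 0 (· + 1)
        else d) d) PySem.Dict.empty
  d.items.map (fun p => (p.1.1, p.1.2, p.2))

-- ===== PORT B =====
def pvPairKeys : List (Int × Int × Int) → List (Int × Int)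
  | [] => []
  | c :: rest =>
      (rest.filter (fun c2 => PySem.Int.band c.2.1 c2.2.1 = 0)).map
        (fun c2 => if c.2.2 ≤ c2.2.2 then (c.2.2, c2.2.2) else (c2.2.2, c.2.2))
      ++ pvPairKeys rest

def count_alpha_by_type_alt (cycles : List (Int × Int × Int)) (n : Int) : List (Int × Int × Int) :=
  (PySem.Dict.counter (pvPairKeys cycles)).items.map (fun p => (p.1.1, p.1.2, p.2))

-- ===== PRECONDITION & SPEC =====
def Spec_count_alpha_by_type (cycles : List (Int × Int × Int)) (n : Int) (out : List (Int × Int × Int)) : Prop := out = count_alpha_by_type_alt cycles n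
instance (cycles : List (Int × Int × Int)) (n : Int) (out : List (Int × Int × Int)) : Decidable (Spec_count_alpha_by_type cycles n out) := by unfold Spec_count_alpha_by_type; infer_instance

-- ===== CLAIM (what is proved, stated in full; the proofs are below) =====
def Claim_equal_count_alpha_by_type : Prop := ∀ (cycles : List (Int × Int × Int)) (n : Int), Dom_count_alpha_by_type cycles n → Spec_count_alpha_by_type cycles n (count_alpha_by_type cycles n)

-- ===== LEMMAS AND PROOFS =====

-- one inner pass of A over the tail `rest`, started at dict d, counts B's keys for that head
lemma inner_eq (c : Int × Int × Int) (rest : List (Int × Int × Int)) (d : PySem.Dict (Int × Int) Int) :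
    rest.foldl (fun d c2 =>
        if PySem.Int.band c.2.1 c2.2.1 = 0 then
          d.modify (pvSortedPair c.2.2 c2.2.2) 0 (· + 1)
        else d) d
    = ((rest.filter (fun c2 => PySem.Int.band c.2.1 c2.2.1 = 0)).map
        (fun c2 => if c.2.2 ≤ c2.2.2 then (c.2.2, c2.2.2) else (c2.2.2, c.2.2))).foldl
        (fun d k => d.modify k 0 (· + 1)) d := by
  induction rest generalizing d with
  | nil => rfl
  | cons x xs ih =>
      simp only [List.foldl_cons, List.filter_cons]
      by_cases h : PySem.Int.band c.2.1 x.2.1 = 0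
      · rw [if_pos h]
        simp only [h, decide_true]
        rw [ih]
        rfl
      · rw [if_neg h]
        simp only [h, decide_false, Bool.false_eq_true, if_false]
        exact ih d

-- A's double loop, started on the suffix `ys` of cycles (with prefix `pre`), equals
-- folding the counter step over B's key list of `ys`
lemma outer_eq (pre ys : List (Int × Int × Int)) (d : PySem.Dict (Int × Int) Int) :
    (PySem.List.pyRange (pre.length : Int) (PySem.List.len (pre ++ ys)) 1).foldl (fun d i =>
      (PySem.List.pyRange (i + 1) (PySem.List.len (pre ++ ys)) 1).foldl (fun d j =>
        let ci := PySem.List.pyGetD (pre ++ ys) i (0, 0, 0)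
        let cj := PySem.List.pyGetD (pre ++ ys) j (0, 0, 0)
        if PySem.Int.band ci.2.1 cj.2.1 = 0 then
          d.modify (pvSortedPair ci.2.2 cj.2.2) 0 (· + 1)
        else d) d) d
    = (pvPairKeys ys).foldl (fun d k => d.modify k 0 (· + 1)) d := by
  induction ys generalizing pre d with
  | nil =>
      rw [PySem.List.pyRange_one_eq_nil (by simp [PySem.List.len])]
      rfl
  | cons c rest ih =>
      rw [PySem.List.pyRange_one_cons (by simp [PySem.List.len]; try omega)]
      simp only [List.foldl_cons]
      have hget : PySem.List.pyGetD (pre ++ c :: rest) (pre.length : Int) (0, 0, 0) = c := by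
        rw [PySem.List.pyGetD_eq_getElem _ (0, 0, 0) (by omega) (by simp; try omega)]
        simp
      have hdrop : (pre ++ c :: rest).drop (((pre.length : Int) + 1).toNat) = rest := by
        have h1 : ((pre.length : Int) + 1).toNat = pre.length + 1 := by omega
        rw [h1, List.drop_append]
        simp
      have hinner : ∀ d0 : PySem.Dict (Int × Int) Int,
          (PySem.List.pyRange ((pre.length : Int) + 1) (PySem.List.len (pre ++ c :: rest)) 1).foldl
            (fun d j =>
              if PySem.Int.band c.2.1 (PySem.List.pyGetD (pre ++ c :: rest) j (0, 0, 0)).2.1 = 0 then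
                d.modify (pvSortedPair c.2.2 (PySem.List.pyGetD (pre ++ c :: rest) j (0, 0, 0)).2.2) 0 (· + 1)
              else d) d0
          = ((rest.filter (fun c2 => PySem.Int.band c.2.1 c2.2.1 = 0)).map
              (fun c2 => if c.2.2 ≤ c2.2.2 then (c.2.2, c2.2.2) else (c2.2.2, c.2.2))).foldl
              (fun d k => d.modify k 0 (· + 1)) d0 := by
        intro d0
        have h2 := PySem.List.foldl_pyRange_pyGetD (pre ++ c :: rest) ((0 : Int), (0 : Int), (0 : Int))
          (fun d cj => if PySem.Int.band c.2.1 cj.2.1 = 0 then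
              d.modify (pvSortedPair c.2.2 cj.2.2) 0 (· + 1) else d) d0
          (a := (pre.length : Int) + 1) (by omega)
        rw [hdrop] at h2
        exact h2.trans (inner_eq c rest d0)
      simp only [hget]
      rw [hinner d]
      have hrest := ih (pre ++ [c])
        (((rest.filter (fun c2 => PySem.Int.band c.2.1 c2.2.1 = 0)).map
            (fun c2 => if c.2.2 ≤ c2.2.2 then (c.2.2, c2.2.2) else (c2.2.2, c.2.2))).foldl
          (fun d k => d.modify k 0 (· + 1)) d)
      simp only [List.append_assoc, List.singleton_append, List.length_append, List.length_cons,
        List.length_nil, Nat.cast_add, Nat.cast_one] at hrest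
      rw [show pvPairKeys (c :: rest) = _ ++ pvPairKeys rest from rfl, List.foldl_append]
      exact hrest

-- ===== VERDICT (by name: the statement is the Claim_ definition above) =====
theorem count_alpha_by_type_spec : Claim_equal_count_alpha_by_type := by
  intro cycles n _
  show count_alpha_by_type cycles n = count_alpha_by_type_alt cycles n
  unfold count_alpha_by_type count_alpha_by_type_alt
  have h := outer_eq [] cycles PySem.Dict.empty
  simp only [List.nil_append, List.length_nil, Nat.cast_zero] at h
  rw [h, PySem.Dict.counter_eq_foldl]
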